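-- pv_equiv track=rewrite | github.com/yejeeni/YeoBaek-Coding-Test-Study | 김민지/13주차/[PGS]로또의최고순위와최저순위_Lv1.py | solution
-- ===== SOURCE A (Python) =====
-- def solution(lottos, win_nums):
--     answer = [0] *2
--     rank = [6,6,5,4,3,2,1]
--
--     #lottos중에 win_nums랑 겹치는 리스트
--     correct = [n for n in lottos if n in win_nums]
--
--     zero = lottos.count(0)  # 0 개수
--
--     answer[0] = rank[len(correct) + zero]  # 최고순위
--     answer[1] = rank[len(correct)]         # 최저순위
--
--
--     return answer
-- ===== SOURCE B (Python) =====
-- def solution(lottos, win_nums):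
--     rank = [6, 6, 5, 4, 3, 2, 1]
--     ls = sorted(lottos)
--     ws = sorted(set(win_nums))
--     matches = zeros = 0
--     j = 0
--     for n in ls:
--         if n == 0:
--             zeros += 1
--         while j < len(ws) and ws[j] < n:
--             j += 1
--         if j < len(ws) and ws[j] == n:
--             matches += 1
--     return [rank[matches + zeros], rank[matches]]
-- ===== Notes on version B (the rewrite author's own statement) =====
-- stated objective: alternative
-- what changed: Replaces the per-element membership scan (nested scans) with sort-then-scan: both lists are sorted (win_nums deduplicated) once and matches are counted by a single two-pointer merge, zeros during the same pass; ranks still come from the table.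
import Mathlib
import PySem

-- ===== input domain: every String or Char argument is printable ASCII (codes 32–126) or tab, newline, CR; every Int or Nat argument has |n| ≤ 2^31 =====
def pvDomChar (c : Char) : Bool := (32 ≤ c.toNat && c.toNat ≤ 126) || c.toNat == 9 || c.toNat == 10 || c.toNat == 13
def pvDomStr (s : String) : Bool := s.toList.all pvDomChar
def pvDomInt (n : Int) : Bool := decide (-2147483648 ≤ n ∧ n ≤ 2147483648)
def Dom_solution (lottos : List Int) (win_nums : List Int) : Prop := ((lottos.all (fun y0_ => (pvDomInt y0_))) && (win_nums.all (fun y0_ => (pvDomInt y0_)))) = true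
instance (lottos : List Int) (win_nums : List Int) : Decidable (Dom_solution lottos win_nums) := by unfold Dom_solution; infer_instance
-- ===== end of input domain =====

-- B replaces A's per-element membership scan with sort-then-scan: sort lottos and the
-- deduplicated win numbers, count matches by a two-pointer merge (objective: alternative).

-- ===== PORT A =====
def solution (lottos : List Int) (win_nums : List Int) : List Int :=
  let rank : List Int := [6, 6, 5, 4, 3, 2, 1]
  let correct : List Int := lottos.filter (fun n => n ∈ win_nums)
  let zeroCnt : Nat := PySem.List.count lottos 0
  match PySem.List.pyGet? rank ((correct.length + zeroCnt : Nat) : Int),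
        PySem.List.pyGet? rank ((correct.length : Nat) : Int) with
  | some a0, some a1 => [a0, a1]
  | _, _ => []   -- IndexError in Python; excluded by Pre_solution

-- ===== PORT B =====
-- the inner 'while j < len(ws) and ws[j] < n: j += 1'
def advB (ws : List Int) (n : Int) (j : Nat) : Nat :=
  if h : j < ws.length then
    if ws[j] < n then advB ws n (j + 1) else j
  else j
termination_by ws.length - j

-- the 'for n in ls' loop, state (matches, zeros, j)
def runB (ws : List Int) : List Int → Nat → Nat → Nat → Nat × Nat
  | [], m, z, _ => (m, z)
  | n :: rest, m, z, j =>
    let z' := if n == 0 then z + 1 else z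
    let j' := advB ws n j
    let m' := if h : j' < ws.length then (if ws[j'] == n then m + 1 else m) else m
    runB ws rest m' z' j'

def solution_alt (lottos : List Int) (win_nums : List Int) : List Int :=
  let rank : List Int := [6, 6, 5, 4, 3, 2, 1]
  let ls : List Int := PySem.List.sorted lottos (fun x => x) false
  let ws : List Int := PySem.List.sorted (PySem.Set.ofList win_nums) (fun x => x) false
  let mz : Nat × Nat := runB ws ls 0 0 0
  match PySem.List.pyGet? rank ((mz.1 + mz.2 : Nat) : Int) with
  | none => []   -- IndexError in Python; excluded by Pre_solution
  | some a0 =>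
    match PySem.List.pyGet? rank ((mz.1 : Nat) : Int) with
    | none => []   -- IndexError in Python; excluded by Pre_solution
    | some a1 => [a0, a1]

-- ===== PRECONDITION & SPEC =====
-- Pre_ excludes exactly the inputs on which both Pythons raise IndexError:
-- more than 6 matched-or-zero entries, so the rank-table lookup is out of range.
def Pre_solution (lottos : List Int) (win_nums : List Int) : Prop :=
  (lottos.countP (fun n => n ∈ win_nums)) + lottos.count 0 ≤ 6
instance (lottos : List Int) (win_nums : List Int) : Decidable (Pre_solution lottos win_nums) := by unfold Pre_solution; infer_instance

def pvWitness_solution : List Int × List Int := ([44, 1, 0, 0, 31, 25], [31, 10, 45, 1, 6, 19])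

def Spec_solution (lottos : List Int) (win_nums : List Int) (out : List Int) : Prop := out = solution_alt lottos win_nums
instance (lottos : List Int) (win_nums : List Int) (out : List Int) : Decidable (Spec_solution lottos win_nums out) := by unfold Spec_solution; infer_instance

-- ===== CLAIM (what is proved, stated in full; the proofs are below) =====
def Claim_equal_solution : Prop := ∀ (lottos : List Int) (win_nums : List Int), Dom_solution lottos win_nums → Pre_solution lottos win_nums → Spec_solution lottos win_nums (solution lottos win_nums)

-- ===== LEMMAS AND PROOFS =====

theorem advB_mid (ws : List Int) (n : Int) (j : Nat) :
    ∀ i (hi : i < ws.length), j ≤ i → i < advB ws n j → ws[i] < n := by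
  fun_induction advB ws n j with
  | case1 j h hlt ih =>
    intro i hi hji hadv
    rcases Nat.eq_or_lt_of_le hji with rfl | hji'
    · exact hlt
    · exact ih i hi hji' hadv
  | case2 j h hlt => intro i hi hji hadv; omega
  | case3 j h => intro i hi hji hadv; omega

theorem advB_stop (ws : List Int) (n : Int) (j : Nat)
    (h : advB ws n j < ws.length) : ¬ ws[advB ws n j] < n := by
  fun_induction advB ws n j with
  | case1 j h1 hlt ih => exact ih h
  | case2 j h1 hlt => exact hlt
  | case3 j h1 => exact absurd h h1

-- the merge loop counts membership in ws and zeros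
theorem runB_spec (ws : List Int) (hws : ws.Pairwise (· < ·)) :
    ∀ (l : List Int) (m z j : Nat),
      l.Pairwise (· ≤ ·) →
      (∀ i (hi : i < ws.length), i < j → ∀ n ∈ l, ws[i] < n) →
      runB ws l m z j = (m + l.countP (fun n => decide (n ∈ ws)), z + l.count 0) := by
  intro l
  induction l with
  | nil => intro m z j _ _; simp [runB]
  | cons n rest ih =>
    intro m z j hsorted hinv
    have hrest : rest.Pairwise (· ≤ ·) := hsorted.of_cons
    have hle : ∀ n' ∈ rest, n ≤ n' := (List.pairwise_cons.mp hsorted).1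
    set j' := advB ws n j with hj'def
    have hmemiff : (∃ h : j' < ws.length, ws[j'] = n) ↔ n ∈ ws := by
      constructor
      · rintro ⟨h, hv⟩; exact hv ▸ List.getElem_mem h
      · intro hmem
        obtain ⟨i, hi, hv⟩ := List.mem_iff_getElem.mp hmem
        have hij' : ¬ i < j' := by
          intro hlt
          rcases Nat.lt_or_ge i j with hij | hij
          · exact absurd hv (ne_of_lt (hinv i hi hij n (List.mem_cons_self)))
          · exact absurd hv (ne_of_lt (advB_mid ws n j i hi hij hlt))
        have hj'lt : j' < ws.length := lt_of_le_of_lt (Nat.not_lt.mp hij') hi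
        refine ⟨hj'lt, ?_⟩
        have hge : n ≤ ws[j'] := Int.not_lt.mp (advB_stop ws n j hj'lt)
        rcases Nat.eq_or_lt_of_le (Nat.not_lt.mp hij') with heq | hlt
        · simp only [heq]; exact hv
        · exact absurd (hv ▸ List.pairwise_iff_getElem.mp hws j' i hj'lt hi hlt)
            (Int.not_lt.mpr hge)
    have hinv' : ∀ i (hi : i < ws.length), i < j' → ∀ n' ∈ rest, ws[i] < n' := by
      intro i hi hij' n' hn'
      have hnn' := hle n' hn'
      rcases Nat.lt_or_ge i j with hij | hij
      · exact lt_of_lt_of_le (hinv i hi hij n List.mem_cons_self) hnn'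
      · exact lt_of_lt_of_le (advB_mid ws n j i hi hij hij') hnn'
    rw [runB, ih _ _ _ hrest hinv']
    simp only [← hj'def, List.countP_cons, List.count_cons, Prod.mk.injEq]
    constructor
    · by_cases hmem : n ∈ ws
      · obtain ⟨h, hv⟩ := hmemiff.mpr hmem
        simp [h, hv, hmem]; omega
      · have hno : ¬ (∃ h : j' < ws.length, ws[j'] = n) := fun hc => hmem (hmemiff.mp hc)
        by_cases h : j' < ws.length
        · have hne : ws[j'] ≠ n := fun hv => hno ⟨h, hv⟩
          simp [h, hne, hmem]
        · simp [h, hmem]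
    · by_cases h0 : n = 0
      · simp [h0]; omega
      · simp [h0]

-- B's counters equal A's counts
theorem runB_eq_counts (lottos win_nums : List Int) :
    runB (PySem.List.sorted (PySem.Set.ofList win_nums) (fun x => x) false)
         (PySem.List.sorted lottos (fun x => x) false) 0 0 0
      = (lottos.countP (fun n => decide (n ∈ win_nums)), lottos.count 0) := by
  set ws := PySem.List.sorted (PySem.Set.ofList win_nums) (fun x => x) false with hws
  set ls := PySem.List.sorted lottos (fun x => x) false with hls
  have hwsp : ws.Pairwise (· < ·) := PySem.List.sorted_ofList_pairwise_lt win_nums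
  have hlsp : ls.Pairwise (· ≤ ·) := by
    simpa using PySem.List.sorted_pairwise lottos (fun x => x)
  have hperm : ls.Perm lottos := PySem.List.sorted_perm lottos (fun x => x) false
  rw [runB_spec ws hwsp ls 0 0 0 hlsp (by intro i hi h; omega)]
  have hmem : ∀ x : Int, (x ∈ ws) ↔ (x ∈ win_nums) := by
    intro x
    rw [hws, PySem.List.mem_sorted, PySem.Set.mem_ofList]
  have h1 : ls.countP (fun n => decide (n ∈ ws)) = ls.countP (fun n => decide (n ∈ win_nums)) :=
    List.countP_congr (fun x _ => by simp [hmem x])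
  rw [h1, hperm.countP_eq, hperm.count_eq]
  simp

-- under Pre_ both rank lookups are in range
theorem solution_rank_get (k : Nat) (hk : k ≤ 6) :
    PySem.List.pyGet? ([6, 6, 5, 4, 3, 2, 1] : List Int) (k : Int)
      = some (7 - max (k : Int) 1) := by
  interval_cases k <;> decide

-- ===== VERDICT (by name: the statement is the Claim_ definition above) =====
theorem solution_spec : Claim_equal_solution := by
  intro lottos win_nums _ hpre
  unfold Spec_solution
  simp only [solution, solution_alt, runB_eq_counts]
  simp only [PySem.List.count_eq, ← List.countP_eq_length_filter]
  have hm : lottos.countP (fun n => decide (n ∈ win_nums)) ≤ 6 := by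
    have := hpre; unfold Pre_solution at this; omega
  have hmz : lottos.countP (fun n => decide (n ∈ win_nums)) + lottos.count 0 ≤ 6 := by
    have := hpre; unfold Pre_solution at this; simpa using this
  rw [solution_rank_get _ hmz, solution_rank_get _ hm]
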